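-- pv_equiv track=rewrite | github.com/tatapestova/python-project-50 | gendiff/gendiff.py | genetare_sorted_dict_diff
-- ===== SOURCE A (Python) =====
-- def genetare_sorted_dict_diff(file1, file2):
--     diff = {}
--     for key in file1:
--         if key in file2 and file1[key] == file2[key]:
--             diff[key] = 'same'
--         if key in file2 and file1[key] != file2[key]:
--             diff[key] = 'diff'
--         if key not in file2:
--             diff[key] = 'only1'
--     set_diff = set(file2) - set(file1)
--     for key in set_diff:
--         diff[key] = 'only2'
--     sorted_diff = dict(sorted(diff.items()))
--     return sorted_diff
-- ===== SOURCE B (Python) =====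
-- def genetare_sorted_dict_diff(file1, file2):
--     result = {}
--     for key in sorted(set(file1) | set(file2)):
--         if key not in file1:
--             result[key] = 'only2'
--         elif key not in file2:
--             result[key] = 'only1'
--         elif file1[key] == file2[key]:
--             result[key] = 'same'
--         else:
--             result[key] = 'diff'
--     return result
-- ===== Notes on version B (the rewrite author's own statement) =====
-- stated objective: simpler
-- what changed: A builds the diff dict with two separate loops (one over file1 with three per-key if-tests, one over the key set difference) and then sorts the items; B computes the sorted union of the two key sets once and classifies each key in a single pass, inserting in already-sorted order so no final sort is needed.
import Mathlib
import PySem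

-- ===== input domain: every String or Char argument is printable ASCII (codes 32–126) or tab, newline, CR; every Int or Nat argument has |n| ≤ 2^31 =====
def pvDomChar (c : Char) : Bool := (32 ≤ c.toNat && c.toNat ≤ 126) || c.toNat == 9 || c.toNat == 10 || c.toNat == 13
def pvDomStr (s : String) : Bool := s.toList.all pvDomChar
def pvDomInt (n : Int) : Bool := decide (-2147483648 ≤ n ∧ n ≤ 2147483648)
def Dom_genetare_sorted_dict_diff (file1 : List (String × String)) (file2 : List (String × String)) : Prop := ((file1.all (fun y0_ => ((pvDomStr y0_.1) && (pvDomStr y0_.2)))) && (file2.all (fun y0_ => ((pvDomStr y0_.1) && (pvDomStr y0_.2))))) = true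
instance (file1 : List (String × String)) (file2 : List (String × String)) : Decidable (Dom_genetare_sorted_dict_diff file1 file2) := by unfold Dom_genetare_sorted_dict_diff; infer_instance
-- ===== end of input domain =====

-- B replaces A's two build loops plus a terminal sort by one classifying pass over the pre-sorted key union (objective: simpler).

-- ===== PORT A =====
def genetare_sorted_dict_diff (file1 : List (String × String)) (file2 : List (String × String)) : List (String × String) :=
  let d1 := PySem.Dict.ofList file1
  let d2 := PySem.Dict.ofList file2
  let diff := d1.keys.foldl (fun d key =>
    let d := if d2.contains key && decide (d1.get? key = d2.get? key) then d.insert key "same" else d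
    let d := if d2.contains key && !decide (d1.get? key = d2.get? key) then d.insert key "diff" else d
    if !(d2.contains key) then d.insert key "only1" else d) PySem.Dict.empty
  let set_diff := PySem.Set.diff (PySem.Set.ofList d2.keys) (PySem.Set.ofList d1.keys)
  let diff2 := set_diff.foldl (fun d key => d.insert key "only2") diff
  -- sorted(diff.items()): the dict's keys are distinct, so Python's tuple comparison is decided
  -- by the first component alone — sorting by the key is exact here.
  PySem.List.sorted diff2.items (fun p => p.1) false

-- ===== PORT B =====
def genetare_sorted_dict_diff_alt (file1 : List (String × String)) (file2 : List (String × String)) : List (String × String) :=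
  let d1 := PySem.Dict.ofList file1
  let d2 := PySem.Dict.ofList file2
  let keys := PySem.List.sorted (PySem.Set.union (PySem.Set.ofList d1.keys) d2.keys) (fun k => k) false
  let result := keys.foldl (fun d key =>
    if !(d1.contains key) then d.insert key "only2"
    else if !(d2.contains key) then d.insert key "only1"
    else if d1.get? key = d2.get? key then d.insert key "same"
    else d.insert key "diff") PySem.Dict.empty
  result.items

-- ===== PRECONDITION & SPEC =====
def Spec_genetare_sorted_dict_diff (file1 : List (String × String)) (file2 : List (String × String)) (out : List (String × String)) : Prop := out = genetare_sorted_dict_diff_alt file1 file2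
instance (file1 : List (String × String)) (file2 : List (String × String)) (out : List (String × String)) : Decidable (Spec_genetare_sorted_dict_diff file1 file2 out) := by unfold Spec_genetare_sorted_dict_diff; infer_instance

-- ===== CLAIM (what is proved, stated in full; the proofs are below) =====
def Claim_equal_genetare_sorted_dict_diff : Prop := ∀ (file1 : List (String × String)) (file2 : List (String × String)), Dom_genetare_sorted_dict_diff file1 file2 → Spec_genetare_sorted_dict_diff file1 file2 (genetare_sorted_dict_diff file1 file2)

-- ===== LEMMAS AND PROOFS =====

-- the common per-key classification both loops compute
def pvCl (d1 d2 : PySem.Dict String String) (k : String) : String :=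
  if d1.contains k then
    if d2.contains k then
      if d1.get? k = d2.get? k then "same" else "diff"
    else "only1"
  else "only2"

-- folding `insert k (f k)` over fresh, duplicate-free keys appends the mapped pairs
lemma dict_foldl_insert_items (ks : List String) (d : PySem.Dict String String)
    (f : String → String) (hn : ks.Nodup) (hf : ∀ k ∈ ks, d.contains k = false) :
    (ks.foldl (fun d k => d.insert k (f k)) d).items = d.items ++ ks.map (fun k => (k, f k)) := by
  induction ks generalizing d with
  | nil => simp
  | cons k ks ih =>
    simp only [List.foldl_cons, List.map_cons]
    rw [ih _ (List.Nodup.of_cons hn) ?fresh]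
    case fresh =>
      intro k' hk'
      rw [PySem.Dict.contains_insert]
      have hne : k' ≠ k := by
        rintro rfl; exact (List.nodup_cons.mp hn).1 hk'
      simp [hne, hf k' (by simp [hk'])]
    rw [PySem.Dict.items_insert_of_not_contains]
    · simp
    · exact hf k (by simp)

lemma dict_foldl_insert_contains (ks : List String) (d : PySem.Dict String String)
    (f : String → String) (x : String) :
    (ks.foldl (fun d k => d.insert k (f k)) d).contains x = (d.contains x || decide (x ∈ ks)) := by
  induction ks generalizing d with
  | nil => simp
  | cons k ks ih =>
    simp only [List.foldl_cons]
    rw [ih, PySem.Dict.contains_insert]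
    by_cases h : x = k
    · simp [h, List.mem_cons]
    · rw [beq_eq_false_iff_ne.mpr h]
      simp [List.mem_cons, h]

-- A's loop body over a key of file1 is a single insert of the classification
lemma stepA_eq (d1 d2 : PySem.Dict String String) :
    (fun (d : PySem.Dict String String) key =>
      let d := if d2.contains key && decide (d1.get? key = d2.get? key) then d.insert key "same" else d
      let d := if d2.contains key && !decide (d1.get? key = d2.get? key) then d.insert key "diff" else d
      if !(d2.contains key) then d.insert key "only1" else d)
    = (fun (d : PySem.Dict String String) key =>
        d.insert key (if d2.contains key then
            (if d1.get? key = d2.get? key then "same" else "diff") else "only1")) := by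
  funext d key
  by_cases h2 : d2.contains key <;> by_cases he : d1.get? key = d2.get? key <;>
    simp [h2, he]

-- B's loop body is a single insert of the classification
lemma stepB_eq (d1 d2 : PySem.Dict String String) :
    (fun (d : PySem.Dict String String) key =>
      if !(d1.contains key) then d.insert key "only2"
      else if !(d2.contains key) then d.insert key "only1"
      else if d1.get? key = d2.get? key then d.insert key "same"
      else d.insert key "diff")
    = (fun (d : PySem.Dict String String) key => d.insert key (pvCl d1 d2 key)) := by
  funext d key
  by_cases h1 : d1.contains key <;> by_cases h2 : d2.contains key <;>
    by_cases he : d1.get? key = d2.get? key <;> simp [pvCl, h1, h2, he]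

-- pairwise ≤ plus nodup gives pairwise <
lemma pairwise_lt_of_le_nodup (l : List String)
    (hle : l.Pairwise (fun a b => a ≤ b)) (hn : l.Nodup) :
    l.Pairwise (fun a b => a < b) :=
  (hle.and hn).imp (fun h => lt_of_le_of_ne h.1 h.2)

-- ===== VERDICT (by name: the statement is the Claim_ definition above) =====
theorem genetare_sorted_dict_diff_spec : Claim_equal_genetare_sorted_dict_diff := by
  intro file1 file2 _
  unfold Spec_genetare_sorted_dict_diff genetare_sorted_dict_diff genetare_sorted_dict_diff_alt
  dsimp only
  set d1 := PySem.Dict.ofList file1 with hd1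
  set d2 := PySem.Dict.ofList file2 with hd2
  have hn1 : d1.keys.Nodup := PySem.Dict.nodup_keys_ofList file1
  have hn2 : d2.keys.Nodup := PySem.Dict.nodup_keys_ofList file2
  -- the set difference and the union of key sets
  set sd := PySem.Set.diff (PySem.Set.ofList d2.keys) (PySem.Set.ofList d1.keys) with hsd
  set un := PySem.Set.union (PySem.Set.ofList d1.keys) d2.keys with hun
  have hmem_sd : ∀ x, x ∈ sd ↔ (x ∈ d2.keys ∧ x ∉ d1.keys) := by
    intro x; rw [hsd, PySem.Set.mem_diff]; simp [PySem.Set.mem_ofList]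
  have hn_sd : sd.Nodup := PySem.Set.nodup_diff _ _ (PySem.Set.nodup_ofList _)
  have hmem_un : ∀ x, x ∈ un ↔ (x ∈ d1.keys ∨ x ∈ d2.keys) := by
    intro x; rw [hun, PySem.Set.mem_union]; simp [PySem.Set.mem_ofList]
  have hn_un : un.Nodup := PySem.Set.nodup_union _ _ (PySem.Set.nodup_ofList _)
  -- A's first loop
  rw [stepA_eq d1 d2]
  -- A's second loop: its keys are fresh w.r.t. the dict built from d1's keys
  have honly2 : (fun (d : PySem.Dict String String) (key : String) => d.insert key "only2")
      = (fun (d : PySem.Dict String String) (key : String) => d.insert key ((fun _ => "only2") key)) := rfl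
  rw [honly2]
  rw [dict_foldl_insert_items sd _ (fun _ => "only2") hn_sd ?fresh]
  case fresh =>
    intro k hk
    rw [dict_foldl_insert_contains]
    have := (hmem_sd k).mp hk
    simp [PySem.Dict.contains_empty, this.2]
  rw [dict_foldl_insert_items _ _ _ hn1 (by intro k _; simp [PySem.Dict.contains_empty])]
  -- both item lists are maps of pvCl over their key lists
  have hmapA : (d1.keys.map (fun k =>
        (k, if d2.contains k then (if d1.get? k = d2.get? k then "same" else "diff") else "only1")))
      = d1.keys.map (fun k => (k, pvCl d1 d2 k)) := by
    apply List.map_congr_left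
    intro k hk
    have h1 : d1.contains k = true := (PySem.Dict.contains_iff_mem_keys d1 k).mpr hk
    simp [pvCl, h1]
  have hmapSd : (sd.map (fun k => (k, "only2")) : List (String × String))
      = sd.map (fun k => (k, pvCl d1 d2 k)) := by
    apply List.map_congr_left
    intro k hk
    have h1 : ¬ d1.contains k = true := by
      rw [PySem.Dict.contains_iff_mem_keys d1 k]; exact ((hmem_sd k).mp hk).2
    simp [pvCl, h1]
  rw [stepB_eq d1 d2]
  rw [dict_foldl_insert_items _ _ _ ?nsort (by intro k _; simp [PySem.Dict.contains_empty])]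
  case nsort =>
    exact ((PySem.List.sorted_perm _ _ _).nodup_iff).mpr hn_un
  have hie : (PySem.Dict.empty : PySem.Dict String String).items = [] := rfl
  simp only [hie, List.nil_append, hmapA, hmapSd, ← List.map_append]
  -- conclude by naming the sorted order
  apply PySem.List.sorted_eq_of_perm_of_pairwise_lt
  · apply List.Perm.map
    apply (List.perm_ext_iff_of_nodup ?na ?nb).mpr
    case na => exact ((PySem.List.sorted_perm _ _ _).nodup_iff).mpr hn_un
    case nb =>
      refine List.Nodup.append hn1 hn_sd ?_
      intro x hx hx'
      exact ((hmem_sd x).mp hx').2 hx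
    intro x
    rw [List.mem_append, PySem.List.mem_sorted, hmem_un x]
    constructor
    · rintro (h | h)
      · tauto
      · by_cases h1 : x ∈ d1.keys
        · tauto
        · exact Or.inr ((hmem_sd x).mpr ⟨h, h1⟩)
    · rintro (h | h)
      · tauto
      · have := (hmem_sd x).mp h; tauto
  · rw [List.pairwise_map]
    exact pairwise_lt_of_le_nodup _
      (PySem.List.sorted_pairwise un (fun k => k))
      (((PySem.List.sorted_perm _ _ _).nodup_iff).mpr hn_un)
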